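-- pv_equiv track=rewrite | github.com/james-6-23/GPT-REG | backend/reg_gpt/config.py | _legacy_provider_has_value
-- ===== SOURCE A (Python) =====
-- from typing import Any, Dict, List
--
-- def _legacy_provider_has_value(provider_type: str, raw: Dict[str, Any]) -> bool:
--     if provider_type == 'mailapi_pool':
--         return any(
--             raw.get(key)
--             for key in ('api_base', 'api_bases', 'api_key', 'domains', 'enabled_email_domains', 'mail_domain_options', 'mail_api_url', 'mail_api_urls')
--         )
--     if provider_type == 'cloudflare':
--         return any(raw.get(key) for key in ('worker_url', 'email_domain', 'api_secret'))
--     if provider_type == 'duckmail':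
--         return any(raw.get(key) for key in ('api_base', 'bearer', 'email_domain'))
--     if provider_type == 'tempmail_lol':
--         return bool(raw.get('api_base'))
--     if provider_type == 'lamail':
--         return any(raw.get(key) for key in ('api_base', 'api_key', 'domain'))
--     return False
-- ===== SOURCE B (Python) =====
-- from typing import Any, Dict
--
-- # Table of key tuples per provider type; one uniform pass over the dict's items
-- # replaces the per-provider branch with its own generator over keys.
-- _LEGACY_KEYS = {
--     'mailapi_pool': ('api_base', 'api_bases', 'api_key', 'domains', 'enabled_email_domains', 'mail_domain_options', 'mail_api_url', 'mail_api_urls'),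
--     'cloudflare': ('worker_url', 'email_domain', 'api_secret'),
--     'duckmail': ('api_base', 'bearer', 'email_domain'),
--     'tempmail_lol': ('api_base',),
--     'lamail': ('api_base', 'api_key', 'domain'),
-- }
--
-- def _legacy_provider_has_value(provider_type: str, raw: Dict[str, Any]) -> bool:
--     keys = _LEGACY_KEYS.get(provider_type, ())
--     return any(bool(v) and k in keys for k, v in raw.items())
-- ===== Notes on version B (the rewrite author's own statement) =====
-- stated objective: simpler
-- what changed: Replaces the five-branch if-chain, each scanning its own key tuple with repeated raw.get lookups, by one table lookup of the provider's key tuple plus a single pass over raw's items testing key membership.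
import Mathlib
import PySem

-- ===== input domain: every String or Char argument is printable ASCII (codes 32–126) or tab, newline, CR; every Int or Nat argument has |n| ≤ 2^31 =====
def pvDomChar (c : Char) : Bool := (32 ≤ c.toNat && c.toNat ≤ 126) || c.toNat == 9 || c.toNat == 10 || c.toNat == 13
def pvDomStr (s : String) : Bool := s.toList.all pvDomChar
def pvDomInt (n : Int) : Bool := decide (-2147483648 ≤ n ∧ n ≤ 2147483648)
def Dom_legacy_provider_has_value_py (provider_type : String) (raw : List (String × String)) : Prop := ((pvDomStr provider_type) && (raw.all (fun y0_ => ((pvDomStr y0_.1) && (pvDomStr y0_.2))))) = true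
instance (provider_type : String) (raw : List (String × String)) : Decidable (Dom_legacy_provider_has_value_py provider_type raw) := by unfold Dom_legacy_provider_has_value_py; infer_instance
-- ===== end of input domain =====

-- B replaces A's five-branch if-chain (each branch scanning its own key tuple via raw.get)
-- by one key-table lookup plus a single membership-testing pass over raw's items (objective: simpler).

-- ===== PORT A =====
-- raw.get(key): first-match lookup in the association list (dict convention), none if absent
def pvGetA (raw : List (String × String)) (k : String) : Option String :=
  (raw.find? (fun p => p.1 == k)).map Prod.snd

-- Python truthiness of raw.get(key): some nonempty string
def pvTruthy (o : Option String) : Bool :=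
  match o with
  | some v => v ≠ ""
  | none => false

def legacy_provider_has_value_py (provider_type : String) (raw : List (String × String)) : Bool :=
  if provider_type == "mailapi_pool" then
    ["api_base", "api_bases", "api_key", "domains", "enabled_email_domains", "mail_domain_options", "mail_api_url", "mail_api_urls"].any (fun k => pvTruthy (pvGetA raw k))
  else if provider_type == "cloudflare" then
    ["worker_url", "email_domain", "api_secret"].any (fun k => pvTruthy (pvGetA raw k))
  else if provider_type == "duckmail" then
    ["api_base", "bearer", "email_domain"].any (fun k => pvTruthy (pvGetA raw k))
  else if provider_type == "tempmail_lol" then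
    pvTruthy (pvGetA raw "api_base")
  else if provider_type == "lamail" then
    ["api_base", "api_key", "domain"].any (fun k => pvTruthy (pvGetA raw k))
  else
    false

-- ===== PORT B =====
-- _LEGACY_KEYS table, looked up with .get (first match), default empty tuple
def pvLegacyKeys : List (String × List String) :=
  [("mailapi_pool", ["api_base", "api_bases", "api_key", "domains", "enabled_email_domains", "mail_domain_options", "mail_api_url", "mail_api_urls"]),
   ("cloudflare", ["worker_url", "email_domain", "api_secret"]),
   ("duckmail", ["api_base", "bearer", "email_domain"]),
   ("tempmail_lol", ["api_base"]),
   ("lamail", ["api_base", "api_key", "domain"])]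

def legacy_provider_has_value_py_alt (provider_type : String) (raw : List (String × String)) : Bool :=
  let keys := ((pvLegacyKeys.find? (fun p => p.1 == provider_type)).map Prod.snd).getD []
  raw.any (fun p => (p.2 ≠ "" : Bool) && keys.contains p.1)

-- ===== PRECONDITION & SPEC =====
-- Pre_ excludes only association lists with duplicate keys: a Python dict cannot contain a
-- duplicate key, and on such degenerate lists A's per-key first-match lookup vs B's whole-list
-- scan is an unspecified corner of the assoc-list encoding.
def Pre_legacy_provider_has_value_py (provider_type : String) (raw : List (String × String)) : Prop :=
  (raw.map Prod.fst).Nodup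
instance (provider_type : String) (raw : List (String × String)) : Decidable (Pre_legacy_provider_has_value_py provider_type raw) := by unfold Pre_legacy_provider_has_value_py; infer_instance

def pvWitness_legacy_provider_has_value_py : String × (List (String × String)) :=
  ("duckmail", [("bearer", "tok"), ("api_base", "")])

def Spec_legacy_provider_has_value_py (provider_type : String) (raw : List (String × String)) (out : Bool) : Prop := out = legacy_provider_has_value_py_alt provider_type raw
instance (provider_type : String) (raw : List (String × String)) (out : Bool) : Decidable (Spec_legacy_provider_has_value_py provider_type raw out) := by unfold Spec_legacy_provider_has_value_py; infer_instance

-- ===== CLAIM (what is proved, stated in full; the proofs are below) =====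
def Claim_equal_legacy_provider_has_value_py : Prop := ∀ (provider_type : String) (raw : List (String × String)), Dom_legacy_provider_has_value_py provider_type raw → Pre_legacy_provider_has_value_py provider_type raw → Spec_legacy_provider_has_value_py provider_type raw (legacy_provider_has_value_py provider_type raw)

-- ===== LEMMAS AND PROOFS =====

-- On a duplicate-free assoc list, the first-match lookup for k is truthy iff some pair (k, v≠"") is in the list.
theorem pvTruthy_get_iff (raw : List (String × String)) (k : String)
    (h : (raw.map Prod.fst).Nodup) :
    pvTruthy (pvGetA raw k) = true ↔ ∃ v, (k, v) ∈ raw ∧ v ≠ "" := by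
  induction raw with
  | nil => simp [pvGetA, pvTruthy]
  | cons a raw ih =>
    simp only [List.map_cons, List.nodup_cons, List.mem_map] at h
    obtain ⟨hnotin, hnd⟩ := h
    have hsome : ∀ v : String, pvTruthy (some v) = true ↔ v ≠ "" := by
      intro v; simp [pvTruthy]
    by_cases hk : a.1 = k
    · subst hk
      have hget : pvGetA (a :: raw) a.1 = some a.2 := by
        simp [pvGetA, List.find?_cons]
      rw [hget, hsome]
      constructor
      · intro hv; exact ⟨a.2, by simp, hv⟩
      · rintro ⟨v, hv, hne⟩
        rcases List.mem_cons.mp hv with h1 | h2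
        · exact congrArg Prod.snd h1 ▸ hne
        · exact absurd ⟨(a.1, v), h2, rfl⟩ hnotin
    · have hget : pvGetA (a :: raw) k = pvGetA raw k := by
        simp [pvGetA, List.find?_cons, hk]
      rw [hget, ih hnd]
      constructor
      · rintro ⟨v, hv, hne⟩; exact ⟨v, List.mem_cons_of_mem _ hv, hne⟩
      · rintro ⟨v, hv, hne⟩
        rcases List.mem_cons.mp hv with h1 | h2
        · exact absurd (congrArg Prod.fst h1.symm) hk
        · exact ⟨v, h2, hne⟩

-- The two scan orders agree on duplicate-free assoc lists.
theorem pvScan_eq (keys : List String) (raw : List (String × String))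
    (h : (raw.map Prod.fst).Nodup) :
    keys.any (fun k => pvTruthy (pvGetA raw k))
      = raw.any (fun p => (p.2 ≠ "" : Bool) && keys.contains p.1) := by
  rw [Bool.eq_iff_iff]
  simp only [List.any_eq_true]
  constructor
  · rintro ⟨k, hk, hget⟩
    obtain ⟨v, hv, hne⟩ := (pvTruthy_get_iff raw k h).mp hget
    exact ⟨(k, v), hv, by simp [hne, hk]⟩
  · rintro ⟨p, hp, hcond⟩
    rw [Bool.and_eq_true] at hcond
    obtain ⟨hne, hmem⟩ := hcond
    refine ⟨p.1, by simpa using hmem, ?_⟩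
    exact (pvTruthy_get_iff raw p.1 h).mpr ⟨p.2, by simpa using hp, by simpa using hne⟩

-- ===== VERDICT (by name: the statement is the Claim_ definition above) =====
theorem legacy_provider_has_value_py_spec : Claim_equal_legacy_provider_has_value_py := by
  intro provider_type raw _ hpre
  unfold Spec_legacy_provider_has_value_py legacy_provider_has_value_py legacy_provider_has_value_py_alt
  unfold Pre_legacy_provider_has_value_py at hpre
  by_cases h1 : provider_type = "mailapi_pool"
  · simp [h1, pvLegacyKeys, pvScan_eq _ _ hpre]
  · by_cases h2 : provider_type = "cloudflare"
    · simp [h2, pvLegacyKeys, pvScan_eq _ _ hpre]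
    · by_cases h3 : provider_type = "duckmail"
      · simp [h3, pvLegacyKeys, pvScan_eq _ _ hpre]
      · by_cases h4 : provider_type = "tempmail_lol"
        · have := pvScan_eq ["api_base"] raw hpre
          simp only [List.any_cons, List.any_nil, Bool.or_false] at this
          simp [h4, pvLegacyKeys, this]
        · by_cases h5 : provider_type = "lamail"
          · simp [h5, pvLegacyKeys, pvScan_eq _ _ hpre]
          · have hfind : pvLegacyKeys.find? (fun p => p.1 == provider_type) = none := by
              simp [pvLegacyKeys, Ne.symm h1, Ne.symm h2, Ne.symm h3, Ne.symm h4, Ne.symm h5]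
            simp [h1, h2, h3, h4, h5, hfind]
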